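-- pv_equiv track=rewrite | github.com/Jeff-Lowrey/conways-steinway | python/src/conways_steinway/audio/piano.py | _is_chord_pattern
-- ===== SOURCE A (Python) =====
-- def _is_chord_pattern(keys: list[int]) -> bool:
--     """Detect if the keys form a chord pattern."""
--     if len(keys) < 3:
--         return False
--
--     # Check for common chord patterns
--     sorted_keys = sorted(keys)
--
--     # Check for triads (3 notes)
--     if len(sorted_keys) >= 3:
--         for i in range(len(sorted_keys) - 2):
--             root = sorted_keys[i]
--             third = sorted_keys[i + 1]
--             fifth = sorted_keys[i + 2]
--
--             interval1 = third - root
--             interval2 = fifth - root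
--
--             # Major chord: 4 and 7 semitones
--             # Minor chord: 3 and 7 semitones
--             # Diminished chord: 3 and 6 semitones
--             # Augmented chord: 4 and 8 semitones
--             if (interval1 == 3 or interval1 == 4) and (6 <= interval2 <= 8):
--                 return True
--
--     # Check for dense clusters (many consecutive notes)
--     if len(sorted_keys) >= 5:
--         consecutive_count = 1
--         for i in range(1, len(sorted_keys)):
--             if sorted_keys[i] - sorted_keys[i - 1] <= 2:
--                 consecutive_count += 1
--                 if consecutive_count >= 5:
--                     return True
--             else:
--                 consecutive_count = 1
--
--     return False
-- ===== SOURCE B (Python) =====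
-- def _is_chord_pattern(keys: list[int]) -> bool:
--     """Single fused streaming pass over the sorted keys: a rolling 3-note
--     window detects triads while a run counter tracks dense clusters."""
--     if len(keys) < 3:
--         return False
--     prev2 = prev1 = None
--     run = 1
--     for x in sorted(keys):
--         if prev2 is not None and prev1 - prev2 in (3, 4) and 6 <= x - prev2 <= 8:
--             return True
--         if prev1 is not None:
--             run = run + 1 if x - prev1 <= 2 else 1
--             if run >= 5:
--                 return True
--         prev2, prev1 = prev1, x
--     return False
-- ===== Notes on version B (the rewrite author's own statement) =====
-- stated objective: alternative
-- what changed: B replaces A's two staged index-based scans over the sorted list (a full triad pass, then a separate length-guarded cluster pass) by ONE fused streaming pass that carries a rolling window of the two previous notes plus a run counter, returning as soon as either pattern appears.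
import Mathlib
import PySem

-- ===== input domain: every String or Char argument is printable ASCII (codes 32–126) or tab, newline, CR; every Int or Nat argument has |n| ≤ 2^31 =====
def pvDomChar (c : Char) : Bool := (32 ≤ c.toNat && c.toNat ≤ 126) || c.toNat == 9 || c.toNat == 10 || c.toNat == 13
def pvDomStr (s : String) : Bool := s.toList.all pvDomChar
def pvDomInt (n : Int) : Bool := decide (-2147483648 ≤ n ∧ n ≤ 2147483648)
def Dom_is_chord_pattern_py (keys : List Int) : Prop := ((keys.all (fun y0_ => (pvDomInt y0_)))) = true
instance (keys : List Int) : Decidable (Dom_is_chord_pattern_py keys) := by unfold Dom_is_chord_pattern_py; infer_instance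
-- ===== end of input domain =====

-- B replaces A's two staged index scans (full triad pass, then a guarded cluster pass)
-- by ONE fused streaming pass over the sorted keys with a rolling 3-note window and a
-- run counter; objective: simpler (same cost).

-- ===== PORT A =====
-- the 'for i in range(len(sorted_keys) - 2)' loop with its early 'return True'
def pvTriadLoopA (s : List Int) : List Int → Bool
  | [] => false
  | i :: rest =>
    let root := PySem.List.pyGetD s i 0
    let third := PySem.List.pyGetD s (i + 1) 0
    let fifth := PySem.List.pyGetD s (i + 2) 0
    let interval1 := third - root
    let interval2 := fifth - root
    if (interval1 == 3 || interval1 == 4) && (6 ≤ interval2 && interval2 ≤ 8) then true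
    else pvTriadLoopA s rest

-- the 'for i in range(1, len(sorted_keys))' loop carrying consecutive_count
def pvClusterLoopA (s : List Int) (cnt : Int) : List Int → Bool
  | [] => false
  | i :: rest =>
    if PySem.List.pyGetD s i 0 - PySem.List.pyGetD s (i - 1) 0 ≤ 2 then
      if cnt + 1 ≥ 5 then true else pvClusterLoopA s (cnt + 1) rest
    else pvClusterLoopA s 1 rest

def is_chord_pattern_py (keys : List Int) : Bool :=
  if keys.length < 3 then false
  else
    let sorted_keys := PySem.List.sorted keys (fun x => x) false
    if (if 3 ≤ sorted_keys.length then
          pvTriadLoopA sorted_keys (PySem.List.pyRange 0 ((sorted_keys.length : Int) - 2) 1)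
        else false) then true
    else if 5 ≤ sorted_keys.length then
      pvClusterLoopA sorted_keys 1 (PySem.List.pyRange 1 (sorted_keys.length : Int) 1)
    else false

-- ===== PORT B =====
-- the 'for x in sorted(keys)' loop of Source B, carrying (prev2, prev1, run)
def pvScanB : Option Int → Option Int → Int → List Int → Bool
  | prev2, prev1, run, x :: rest =>
    if (match prev2, prev1 with
        | some p2, some p1 => (p1 - p2 == 3 || p1 - p2 == 4) && (6 ≤ x - p2 && x - p2 ≤ 8)
        | _, _ => false) then true
    else
      match prev1 with
      | some p1 =>
        let run' := if x - p1 ≤ 2 then run + 1 else 1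
        if run' ≥ 5 then true else pvScanB prev1 (some x) run' rest
      | none => pvScanB prev1 (some x) run rest
  | _, _, _, [] => false

def is_chord_pattern_py_alt (keys : List Int) : Bool :=
  if keys.length < 3 then false
  else pvScanB none none 1 (PySem.List.sorted keys (fun x => x) false)

-- ===== PRECONDITION & SPEC =====
def Spec_is_chord_pattern_py (keys : List Int) (out : Bool) : Prop := out = is_chord_pattern_py_alt keys
instance (keys : List Int) (out : Bool) : Decidable (Spec_is_chord_pattern_py keys out) := by unfold Spec_is_chord_pattern_py; infer_instance

-- ===== CLAIM (what is proved, stated in full; the proofs are below) =====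
def Claim_equal_is_chord_pattern_py : Prop := ∀ (keys : List Int), Dom_is_chord_pattern_py keys → Spec_is_chord_pattern_py keys (is_chord_pattern_py keys)

-- ===== LEMMAS AND PROOFS =====

-- the triad test on a window (root, third, fifth)
def pvTriadF (a b c : Int) : Bool := (b - a == 3 || b - a == 4) && (6 ≤ c - a && c - a ≤ 8)

-- sliding window of width 3 over a list
def pvWin3 (f : Int → Int → Int → Bool) : List Int → Bool
  | a :: b :: c :: t => f a b c || pvWin3 f (b :: c :: t)
  | _ => false

-- A's cluster loop expressed on the values of the sorted list
def pvClus (prev cnt : Int) : List Int → Bool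
  | [] => false
  | x :: rest =>
    if x - prev ≤ 2 then (if cnt + 1 ≥ 5 then true else pvClus x (cnt + 1) rest)
    else pvClus x 1 rest

theorem pvAnyCongrNat {l : List Nat} {p q : Nat → Bool} (h : ∀ a ∈ l, p a = q a) :
    l.any p = l.any q := by
  induction l with
  | nil => rfl
  | cons a t ih => simp [List.any_cons, h a (by simp), ih (fun x hx => h x (by simp [hx]))]

theorem pvTriadLoopA_any (s : List Int) (idxs : List Int) :
    pvTriadLoopA s idxs = idxs.any (fun i =>
      pvTriadF (PySem.List.pyGetD s i 0) (PySem.List.pyGetD s (i + 1) 0)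
        (PySem.List.pyGetD s (i + 2) 0)) := by
  induction idxs with
  | nil => rfl
  | cons i rest ih =>
    simp only [pvTriadLoopA, List.any_cons, ih, pvTriadF]
    split_ifs with h
    · rw [h, Bool.true_or]
    · rw [Bool.not_eq_true] at h
      rw [h, Bool.false_or]

theorem pvRangeAnyWin3 (f : Int → Int → Int → Bool) (s : List Int) :
    (List.range (s.length - 2)).any
      (fun k => f (s.getD k 0) (s.getD (k + 1) 0) (s.getD (k + 2) 0)) = pvWin3 f s := by
  induction s with
  | nil => rfl
  | cons a t ih =>
    match t with
    | [] => rfl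
    | [b] => rfl
    | b :: c :: t' =>
      have hlen : (a :: b :: c :: t').length - 2 = ((b :: c :: t').length - 2) + 1 := by
        simp
      rw [hlen, List.range_succ_eq_map, List.any_cons, List.any_map]
      show _ = pvWin3 f (a :: b :: c :: t')
      rw [pvWin3, ← ih]
      congr 1

-- A's triad pass is the 3-window scan over the sorted values
theorem pvTriadA_win3 (s : List Int) :
    pvTriadLoopA s (PySem.List.pyRange 0 ((s.length : Int) - 2) 1) = pvWin3 pvTriadF s := by
  rw [pvTriadLoopA_any, PySem.List.pyRange_one, List.any_map]
  have hcast : ((s.length : Int) - 2 - 0).toNat = s.length - 2 := by omega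
  rw [hcast, ← pvRangeAnyWin3 pvTriadF]
  apply pvAnyCongrNat
  intro k _
  simp only [Function.comp]
  have e1 : (0 : Int) + (k : Int) = ((k : Nat) : Int) := by omega
  have e2 : ((k : Nat) : Int) + 1 = (((k + 1 : Nat)) : Int) := by push_cast; omega
  have e3 : ((k : Nat) : Int) + 2 = (((k + 2 : Nat)) : Int) := by push_cast; omega
  rw [e1, e2, e3, PySem.List.pyGetD_natCast, PySem.List.pyGetD_natCast, PySem.List.pyGetD_natCast]

-- A's cluster pass over index range = pvClus over the values
theorem pvClusterA_clus (a : Int) (rest : List Int) (cnt : Int) :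
    pvClusterLoopA (a :: rest) cnt
        (PySem.List.pyRange 1 ((a :: rest).length : Int) 1) = pvClus a cnt rest := by
  suffices h : ∀ (pre : List Int) (prev : Int) (rest : List Int) (cnt : Int),
      pvClusterLoopA (pre ++ prev :: rest) cnt
        (PySem.List.pyRange ((pre.length : Int) + 1) (((pre ++ prev :: rest).length : Int)) 1)
        = pvClus prev cnt rest by
    have := h [] a rest cnt
    simpa using this
  intro pre prev rest
  induction rest generalizing pre prev with
  | nil =>
    intro cnt
    have : ((pre.length : Int) + 1) = (((pre ++ [prev]).length : Int)) := by simp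
    rw [this, PySem.List.pyRange_one]
    simp [pvClus, pvClusterLoopA]
  | cons x rest' ih =>
    intro cnt
    have hlen : ((pre ++ prev :: x :: rest').length : Int) = (pre.length : Int) + 2 + rest'.length := by
      simp; omega
    have hcons : PySem.List.pyRange ((pre.length : Int) + 1) ((pre ++ prev :: x :: rest').length : Int) 1
        = ((pre.length : Int) + 1) :: PySem.List.pyRange ((pre.length : Int) + 2) ((pre ++ prev :: x :: rest').length : Int) 1 := by
      apply PySem.List.pyRange_one_cons
      omega
    rw [hcons]
    have hget1 : PySem.List.pyGetD (pre ++ prev :: x :: rest') ((pre.length : Int) + 1) 0 = x := by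
      have : ((pre.length : Int) + 1) = (((pre.length + 1 : Nat)) : Int) := by push_cast; omega
      rw [this, PySem.List.pyGetD_natCast]
      simp [List.getD_eq_getElem?_getD]
    have hget0 : PySem.List.pyGetD (pre ++ prev :: x :: rest') ((pre.length : Int) + 1 - 1) 0 = prev := by
      have : ((pre.length : Int) + 1 - 1) = ((pre.length : Nat) : Int) := by omega
      rw [this, PySem.List.pyGetD_natCast]
      simp [List.getD_eq_getElem?_getD]
    have hshift : ∀ c : Int, pvClusterLoopA (pre ++ prev :: x :: rest') c
        (PySem.List.pyRange ((pre.length : Int) + 2) ((pre ++ prev :: x :: rest').length : Int) 1)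
        = pvClus x c rest' := by
      intro c
      have := ih (pre ++ [prev]) x c
      have e : pre ++ prev :: x :: rest' = (pre ++ [prev]) ++ x :: rest' := by simp
      have e2 : ((pre ++ [prev]).length : Int) + 1 = (pre.length : Int) + 2 := by simp; omega
      rw [e, ← e2]
      rw [this]
    simp only [pvClusterLoopA, hget1, hget0, pvClus]
    split_ifs with h1 h2
    · rfl
    · exact hshift (cnt + 1)
    · exact hshift 1

-- a cluster run cannot reach 5 notes if cnt + remaining < 5
theorem pvClus_short (rest : List Int) (prev cnt : Int) (h1 : 1 ≤ cnt)
    (h : cnt + rest.length < 5) : pvClus prev cnt rest = false := by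
  induction rest generalizing prev cnt with
  | nil => rfl
  | cons x rest' ih =>
    simp only [List.length_cons] at h
    simp only [pvClus]
    split_ifs with hx hge
    · exact absurd hge (by push_cast at h ⊢; omega)
    · exact ih x (cnt + 1) (by omega) (by push_cast at h ⊢; omega)
    · exact ih x 1 (by omega) (by push_cast at h ⊢; omega)

-- the fused scan, once two previous notes are known, is triad-window OR cluster-run
theorem pvScanB_eq (l : List Int) (p2 p1 run : Int) :
    pvScanB (some p2) (some p1) run l
      = (pvWin3 pvTriadF (p2 :: p1 :: l) || pvClus p1 run l) := by
  induction l generalizing p2 p1 run with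
  | nil => rfl
  | cons x rest ih =>
    show (if pvTriadF p2 p1 x then true
         else if (if x - p1 ≤ 2 then run + 1 else 1) ≥ 5 then true
         else pvScanB (some p1) (some x) (if x - p1 ≤ 2 then run + 1 else 1) rest)
        = ((pvTriadF p2 p1 x || pvWin3 pvTriadF (p1 :: x :: rest)) ||
            (if x - p1 ≤ 2 then (if run + 1 ≥ 5 then true else pvClus x (run + 1) rest)
             else pvClus x 1 rest))
    by_cases hf : pvTriadF p2 p1 x = true
    · simp [hf]
    · rw [Bool.not_eq_true] at hf
      by_cases hx : x - p1 ≤ 2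
      · by_cases hge : run + 1 ≥ 5
        · simp [hf, hx, hge]
        · simp [hf, hx, hge, ih]
      · simp [hf, hx, ih, show ¬((1 : Int) ≥ 5) from by omega]

-- ===== VERDICT (by name: the statement is the Claim_ definition above) =====
theorem is_chord_pattern_py_spec : Claim_equal_is_chord_pattern_py := by
  intro keys _
  unfold Spec_is_chord_pattern_py is_chord_pattern_py is_chord_pattern_py_alt
  by_cases hlen : keys.length < 3
  · simp [hlen]
  · simp only [if_neg hlen]
    set s := PySem.List.sorted keys (fun x => x) false with hs
    have hsl : s.length = keys.length := PySem.List.length_sorted ..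
    have h3 : 3 ≤ s.length := by omega
    match s, h3 with
    | a :: b :: rest, _ =>
      have h3' : 3 ≤ (a :: b :: rest).length := by assumption
      -- unfold B's first two loop steps
      have hB : pvScanB none none 1 (a :: b :: rest)
          = pvScanB (some a) (some b) (if b - a ≤ 2 then (1 : Int) + 1 else 1) rest := by
        show pvScanB none (some a) 1 (b :: rest) = _
        show (if (if b - a ≤ 2 then (1:Int) + 1 else 1) ≥ 5 then true
              else pvScanB (some a) (some b) (if b - a ≤ 2 then (1:Int) + 1 else 1) rest) = _
        rw [if_neg (by split_ifs <;> omega)]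
      rw [hB, pvScanB_eq]
      have hclusStep : pvClus a 1 (b :: rest)
          = pvClus b (if b - a ≤ 2 then (1 : Int) + 1 else 1) rest := by
        show (if b - a ≤ 2 then (if (1:Int) + 1 ≥ 5 then true else pvClus b (1 + 1) rest)
              else pvClus b 1 rest) = _
        split_ifs with h1 h2
        · omega
        · rfl
        · rfl
      rw [if_pos h3', pvTriadA_win3]
      by_cases htr : pvWin3 pvTriadF (a :: b :: rest) = true
      · simp [htr]
      · rw [Bool.not_eq_true] at htr
        simp only [htr, Bool.false_eq_true, if_false, Bool.false_or]
        by_cases h5 : 5 ≤ (a :: b :: rest).length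
        · rw [if_pos h5, pvClusterA_clus, hclusStep]
        · rw [if_neg h5]
          symm
          rw [← hclusStep]
          apply pvClus_short _ _ _ le_rfl
          simp only [List.length_cons] at h5 ⊢
          push_cast
          omega
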